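-- pv_equiv track=rewrite | github.com/jbert/aoc-2024 | d25.py | parse_lock
-- ===== SOURCE A (Python) =====
-- def parse_lock(chunk):
--     lock = []
--     for i in range(len(chunk[0])):
--         for j in range(len(chunk)):
--             if chunk[j][i] == '.':
--                 lock.append(j-1)
--                 break
--     return lock
-- ===== SOURCE B (Python) =====
-- def parse_lock(chunk):
--     width = len(chunk[0])
--     result = [None] * width
--     for j in range(len(chunk)):
--         row = chunk[j]
--         for i in range(width):
--             if result[i] is None and row[i] == '.':
--                 result[i] = j - 1
--     return [v for v in result if v is not None]
-- ===== Notes on version B (the rewrite author's own statement) =====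
-- stated objective: alternative
-- what changed: Inverts the loop nesting: instead of A's column-major scan (for each column, scan rows until the first '.'), B makes one row-major pass maintaining a per-column sentinel slot list (slot i gets j-1 at the first row j with a '.' in column i) and finally keeps the filled slots.
import Mathlib
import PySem

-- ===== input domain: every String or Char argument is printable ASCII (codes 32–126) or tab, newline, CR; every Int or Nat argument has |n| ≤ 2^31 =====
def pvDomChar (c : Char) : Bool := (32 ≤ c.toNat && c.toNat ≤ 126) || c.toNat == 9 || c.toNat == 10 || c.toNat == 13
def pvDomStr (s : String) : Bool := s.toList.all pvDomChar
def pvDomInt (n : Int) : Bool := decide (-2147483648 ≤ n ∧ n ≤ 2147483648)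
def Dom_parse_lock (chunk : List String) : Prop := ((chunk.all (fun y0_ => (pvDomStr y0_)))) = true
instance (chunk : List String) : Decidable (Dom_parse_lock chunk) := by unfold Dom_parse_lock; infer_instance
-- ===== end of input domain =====

-- B inverts A's nesting: one row-major pass filling per-column sentinel slots replaces A's
-- per-column rescans of the rows (alternative decomposition; return value proved equal on Pre_).


-- ===== PORT A =====
-- inner 'for j in range(...): if chunk[j][i] == '.': lock.append(j-1); break' loop;
-- returns the appended value, none when the loop falls through (or an index is out of
-- range = Python IndexError, excluded by Pre_)
def parse_lockInner (chunk : List String) (i : Int) : List Int → Option Int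
  | [] => none
  | j :: js =>
    match PySem.List.pyGet? chunk j with
    | none => none
    | some row =>
      match PySem.Str.pyGet? row i with
      | none => none
      | some c => if c = '.' then some (j - 1) else parse_lockInner chunk i js

def parse_lock (chunk : List String) : List Int :=
  match PySem.List.pyGet? chunk 0 with
  | none => []  -- chunk[0] raises IndexError in Python; excluded by Pre_
  | some row0 =>
    (PySem.List.pyRange 0 (PySem.Str.len row0) 1).foldl
      (fun lock i =>
        match parse_lockInner chunk i (PySem.List.pyRange 0 (chunk.length : Int) 1) with
        | some v => lock ++ [v]
        | none => lock) []

-- ===== PORT B =====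
def parse_lock_alt (chunk : List String) : List Int :=
  match PySem.List.pyGet? chunk 0 with
  | none => []  -- len(chunk[0]) raises IndexError in Python; excluded by Pre_
  | some row0 =>
    let width : Int := PySem.Str.len row0
    let result : List (Option Int) := List.replicate width.toNat none
    let result := (PySem.List.pyRange 0 (chunk.length : Int) 1).foldl
      (fun result j =>
        match PySem.List.pyGet? chunk j with
        | none => result  -- unreachable: j ranges over the row indices
        | some row =>
          (PySem.List.pyRange 0 width 1).foldl
            (fun result i =>
              if (PySem.List.pyGetD result i none).isNone then
                match PySem.Str.pyGet? row i with
                | none => result  -- row[i] raises IndexError in Python; excluded by Pre_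
                | some c =>
                  if c = '.' then PySem.List.pySetD result i (some (j - 1)) else result
              else result)
            result)
      result
    result.filterMap id  -- [v for v in result if v is not None]

-- ===== PRECONDITION & SPEC =====
-- pvQ i s: row s has a '.' at column i (and column i exists in s)
def pvQ (i : Nat) (s : String) : Bool :=
  decide (i < s.toList.length) && (s.toList.getD i default == '.')

-- Exactly the inputs on which the Python A returns: the chunk is nonempty (else chunk[0]
-- raises IndexError), and every cell chunk[j][i] that the column scan reads — column
-- i < len(chunk[0]), row j reached because no earlier row has a '.' in column i — is in
-- range (else chunk[j][i] raises IndexError).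
def Pre_parse_lock (chunk : List String) : Prop :=
  chunk ≠ [] ∧ ∀ i < chunk.headI.toList.length, ∀ j < chunk.length,
    (∀ j' < j, pvQ i (chunk.getD j' "") = false) →
    i < (chunk.getD j "").toList.length
instance (chunk : List String) : Decidable (Pre_parse_lock chunk) := by unfold Pre_parse_lock; infer_instance

def pvWitness_parse_lock : List String := ["#.", ".#"]

def Spec_parse_lock (chunk : List String) (out : List Int) : Prop := out = parse_lock_alt chunk
instance (chunk : List String) (out : List Int) : Decidable (Spec_parse_lock chunk out) := by unfold Spec_parse_lock; infer_instance

-- ===== CLAIM (what is proved, stated in full; the proofs are below) =====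
def Claim_equal_parse_lock : Prop := ∀ (chunk : List String), Dom_parse_lock chunk → Pre_parse_lock chunk → Spec_parse_lock chunk (parse_lock chunk)

-- ===== LEMMAS AND PROOFS =====
-- the canonical value both programs compute for column i: index of the first row with a
-- '.' in column i (as found by List.findIdx?), minus one
def pvCol (chunk : List String) (i : Nat) : Option Int :=
  (chunk.findIdx? (pvQ i)).map (fun k => ((k : Nat) : Int) - 1)

-- state of B's result list after the first j rows have been processed
def pvRes (chunk : List String) (w j : Nat) : List (Option Int) :=
  (List.range w).map (fun i =>
    ((chunk.take j).findIdx? (pvQ i)).map (fun k => ((k : Nat) : Int) - 1))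

theorem pvInnerA (chunk : List String) (i : Nat)
    (hcol : ∀ j < chunk.length, (∀ j' < j, pvQ i (chunk.getD j' "") = false) →
      i < (chunk.getD j "").toList.length) :
    ∀ (n j₀ : Nat), chunk.length - j₀ = n → j₀ ≤ chunk.length →
    (∀ j' < j₀, pvQ i (chunk.getD j' "") = false) →
    parse_lockInner chunk (i:Int) (PySem.List.pyRange (j₀:Int) (chunk.length:Int) 1) =
    ((chunk.drop j₀).findIdx? (pvQ i)).map (fun k => ((j₀ + k : Nat) : Int) - 1) := by
  intro n
  induction n with
  | zero =>
    intro j₀ h0 hle _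
    have hj : j₀ = chunk.length := by omega
    subst hj
    rw [PySem.List.pyRange_one_eq_nil le_rfl, List.drop_length]
    rfl
  | succ n ih =>
    intro j₀ h0 hle hpref
    have hlt : j₀ < chunk.length := by omega
    have hgD : chunk.getD j₀ "" = chunk[j₀] := List.getD_eq_getElem _ _ hlt
    have hrow : i < (chunk[j₀]).toList.length := by
      have := hcol j₀ hlt hpref
      rwa [hgD] at this
    rw [PySem.List.pyRange_one_cons (by exact_mod_cast hlt)]
    have h1 : PySem.List.pyGet? chunk (j₀:Int) = some chunk[j₀] := by
      rw [PySem.List.pyGet?_natCast]; simp [hlt]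
    have h2 : PySem.Str.pyGet? chunk[j₀] (i:Int) = some ((chunk[j₀]).toList[i]) := by
      rw [PySem.Str.pyGet?_natCast]; simp
    have hdrop : chunk.drop j₀ = chunk[j₀] :: chunk.drop (j₀+1) := (List.getElem_cons_drop hlt).symm
    have hgd : (chunk[j₀]).toList.getD i default = (chunk[j₀]).toList[i] :=
      List.getD_eq_getElem _ _ hrow
    simp only [parse_lockInner, h1, h2, hdrop, List.findIdx?_cons]
    by_cases hc : (chunk[j₀]).toList[i] = '.'
    · have hq : pvQ i chunk[j₀] = true := by
        simp only [pvQ, Bool.and_eq_true, decide_eq_true_eq, beq_iff_eq, hgd, hc]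
        exact ⟨hrow, trivial⟩
      rw [if_pos hc, hq, if_pos rfl]
      simp
    · have hq : pvQ i chunk[j₀] = false := by
        simp only [pvQ, hgd, Bool.and_eq_false_iff, beq_eq_false_iff_ne, ne_eq]
        exact Or.inr hc
      rw [if_neg hc, hq]
      simp only [Bool.false_eq_true, if_false]
      rw [show ((j₀:Int) + 1) = ((j₀+1 : Nat) : Int) from by push_cast; ring]
      rw [ih (j₀+1) (by omega) (by omega) (by
        intro j' hj'
        rcases Nat.lt_succ_iff_lt_or_eq.mp hj' with h | h
        · exact hpref j' h
        · subst h; rwa [hgD])]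
      cases List.findIdx? (pvQ i) (chunk.drop (j₀+1)) with
      | none => rfl
      | some k =>
        simp only [Option.map_some]
        congr 1
        push_cast
        ring

theorem pvFoldlOpt (chunk : List String) (js : List Int) (l : List Int) : ∀ (acc : List Int),
    l.foldl (fun lock i =>
        match parse_lockInner chunk i js with
        | some v => lock ++ [v]
        | none => lock) acc
      = acc ++ l.filterMap (fun i => parse_lockInner chunk i js) := by
  induction l with
  | nil => intro acc; simp
  | cons a l ih =>
    intro acc
    cases h : parse_lockInner chunk a js <;> simp [h, ih]

-- B's inner loop ('for i in range(width)') updates each slot of result in place from its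
-- own old value and row[i]
theorem pvInnerFold (row : String) (j : Int) :
    ∀ (n : Nat) (res : List (Option Int)), n ≤ res.length →
    (PySem.List.pyRange 0 (n:Int) 1).foldl
        (fun result i =>
          if (PySem.List.pyGetD result i none).isNone then
            match PySem.Str.pyGet? row i with
            | none => result
            | some c =>
              if c = '.' then PySem.List.pySetD result i (some (j - 1)) else result
          else result) res
    = res.mapIdx (fun i v =>
        if i < n then
          if v.isNone then
            match PySem.Str.pyGet? row (i:Int) with
            | none => v
            | some c => if c = '.' then some (j - 1) else v
          else v
        else v) := by
  intro n
  induction n with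
  | zero =>
    intro res _
    rw [show ((0:Nat):Int) = (0:Int) from rfl, PySem.List.pyRange_one_eq_nil le_rfl]
    apply List.ext_getElem
    · simp
    · intro k h1 h2
      simp [List.getElem_mapIdx]
  | succ n ih =>
    intro res hn
    have hlt : n < res.length := by omega
    rw [show ((n+1 : Nat):Int) = (n:Int) + 1 from by push_cast; ring,
      PySem.List.pyRange_one_succ_right (by exact_mod_cast Nat.zero_le n), List.foldl_append,
      ih res (by omega)]
    set R := res.mapIdx (fun i v =>
        if i < n then
          if v.isNone then
            match PySem.Str.pyGet? row (i:Int) with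
            | none => v
            | some c => if c = '.' then some (j - 1) else v
          else v
        else v) with hR
    have hRlen : R.length = res.length := by rw [hR]; exact List.length_mapIdx
    have hRn : PySem.List.pyGetD R (n:Int) none = res[n] := by
      rw [PySem.List.pyGetD_natCast, List.getD_eq_getElem R none (by omega)]
      simp only [hR, List.getElem_mapIdx]
      simp
    simp only [List.foldl_cons, List.foldl_nil, hRn]
    by_cases h1 : (res[n]).isNone
    · cases hg : PySem.Str.pyGet? row (n:Int) with
      | none =>
        have hg' : row.toList[n]? = none := by simpa using hg
        rw [if_pos h1]
        show R = _
        apply List.ext_getElem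
        · simp [hRlen]
        · intro k hk1 hk2
          have hklen : k < res.length := by rwa [hRlen] at hk1
          simp only [hR, List.getElem_mapIdx]
          by_cases hkn : k = n
          · subst hkn
            simp [h1, hg']
          · by_cases hkn' : k < n
            · simp [hkn', Nat.lt_succ_of_lt hkn']
            · have hkn'' : ¬ k < n + 1 := by omega
              simp [hkn', hkn'']
      | some c =>
        have hg' : row.toList[n]? = some c := by simpa using hg
        by_cases hc : c = '.'
        · rw [if_pos h1]
          show (if c = '.' then PySem.List.pySetD R (↑n) (some (j - 1)) else R) = _
          rw [if_pos hc]
          apply List.ext_getElem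
          · simp [hRlen]
          · intro k hk1 hk2
            have hklen : k < res.length := by
              have := hk1
              rwa [PySem.List.length_pySetD, hRlen] at this
            simp only [PySem.List.pySetD_natCast, List.getElem_set, hR, List.getElem_mapIdx]
            by_cases hkn : n = k
            · subst hkn
              simp [h1, hg', hc]
            · rw [if_neg hkn]
              by_cases hkn' : k < n
              · simp [hkn', Nat.lt_succ_of_lt hkn']
              · have hkn'' : ¬ k < n + 1 := by omega
                simp [hkn', hkn'']
        · rw [if_pos h1]
          show (if c = '.' then PySem.List.pySetD R (↑n) (some (j - 1)) else R) = _
          rw [if_neg hc]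
          apply List.ext_getElem
          · simp [hRlen]
          · intro k hk1 hk2
            have hklen : k < res.length := by rwa [hRlen] at hk1
            simp only [hR, List.getElem_mapIdx]
            by_cases hkn : k = n
            · subst hkn
              simp [h1, hg', hc]
            · by_cases hkn' : k < n
              · simp [hkn', Nat.lt_succ_of_lt hkn']
              · have hkn'' : ¬ k < n + 1 := by omega
                simp [hkn', hkn'']
    · rw [if_neg h1]
      apply List.ext_getElem
      · simp [hRlen]
      · intro k hk1 hk2
        have hklen : k < res.length := by rwa [hRlen] at hk1
        simp only [hR, List.getElem_mapIdx]
        by_cases hkn : k = n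
        · subst hkn
          simp [h1]
        · by_cases hkn' : k < n
          · simp [hkn', Nat.lt_succ_of_lt hkn']
          · have hkn'' : ¬ k < n + 1 := by omega
            simp [hkn', hkn'']

theorem pvRes_length (chunk : List String) (w j : Nat) : (pvRes chunk w j).length = w := by
  simp [pvRes]

-- B's outer loop ('for j in range(len(chunk))') advances the per-column state row by row
theorem pvOuterFold (chunk : List String) (w : Nat)
    (hcol : ∀ i < w, ∀ j < chunk.length, (∀ j' < j, pvQ i (chunk.getD j' "") = false) →
      i < (chunk.getD j "").toList.length) :
    ∀ (n j₀ : Nat), chunk.length - j₀ = n → j₀ ≤ chunk.length →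
    (PySem.List.pyRange (j₀:Int) (chunk.length:Int) 1).foldl
        (fun result j =>
          match PySem.List.pyGet? chunk j with
          | none => result
          | some row =>
            (PySem.List.pyRange 0 (w:Int) 1).foldl
              (fun result i =>
                if (PySem.List.pyGetD result i none).isNone then
                  match PySem.Str.pyGet? row i with
                  | none => result
                  | some c =>
                    if c = '.' then PySem.List.pySetD result i (some (j - 1)) else result
                else result)
              result)
        (pvRes chunk w j₀)
    = pvRes chunk w chunk.length := by
  intro n
  induction n with
  | zero =>
    intro j₀ h0 hle
    have hj : j₀ = chunk.length := by omega
    subst hj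
    rw [PySem.List.pyRange_one_eq_nil le_rfl]
    rfl
  | succ n ih =>
    intro j₀ h0 hle
    have hlt : j₀ < chunk.length := by omega
    have h1 : PySem.List.pyGet? chunk (j₀:Int) = some chunk[j₀] := by
      rw [PySem.List.pyGet?_natCast]; simp [hlt]
    rw [PySem.List.pyRange_one_cons (show (j₀:Int) < (chunk.length:Int) by exact_mod_cast hlt)]
    simp only [List.foldl_cons, h1]
    rw [pvInnerFold chunk[j₀] ((j₀:Int)) w (pvRes chunk w j₀) (by rw [pvRes_length])]
    have hstep : (pvRes chunk w j₀).mapIdx (fun i v =>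
        if i < w then
          if v.isNone then
            match PySem.Str.pyGet? chunk[j₀] (i:Int) with
            | none => v
            | some c => if c = '.' then some ((j₀:Int) - 1) else v
          else v
        else v) = pvRes chunk w (j₀+1) := by
      apply List.ext_getElem
      · simp [pvRes]
      · intro i hi1 hi2
        have hiw : i < w := by
          have := hi1
          rwa [List.length_mapIdx, pvRes_length] at this
        simp only [List.getElem_mapIdx, pvRes, List.getElem_map, List.getElem_range, if_pos hiw]
        rw [List.take_add_one, List.getElem?_eq_getElem hlt]
        simp only [Option.toList_some]
        rw [List.findIdx?_append]
        cases hfi : (chunk.take j₀).findIdx? (pvQ i) with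
        | some k => simp
        | none =>
          have hpref : ∀ j' < j₀, pvQ i (chunk.getD j' "") = false := by
            intro j' hj'
            have hj'len : j' < chunk.length := by omega
            rw [List.getD_eq_getElem _ _ hj'len]
            refine (List.findIdx?_eq_none_iff.mp hfi) _ ?_
            have hj't : j' < (chunk.take j₀).length := by
              rw [List.length_take]; omega
            have : (chunk.take j₀)[j'] = chunk[j'] := List.getElem_take
            rw [← this]
            exact List.getElem_mem hj't
          have hrow : i < chunk[j₀].toList.length := by
            have := hcol i hiw j₀ hlt hpref
            rwa [List.getD_eq_getElem _ _ hlt] at this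
          have hg : PySem.Str.pyGet? chunk[j₀] (i:Int) = some (chunk[j₀].toList[i]) := by
            rw [PySem.Str.pyGet?_natCast]; simp
          have hlen' : (chunk.take j₀).length = j₀ := by
            rw [List.length_take]; omega
          simp only [hg, Option.map_none, Option.isNone_none, List.findIdx?_cons,
            List.findIdx?_nil, hlen']
          by_cases hc : chunk[j₀].toList[i] = '.'
          · have hq : pvQ i chunk[j₀] = true := by
              simp only [pvQ, Bool.and_eq_true, decide_eq_true_eq, beq_iff_eq,
                List.getD_eq_getElem _ _ hrow, hc]
              exact ⟨hrow, trivial⟩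
            rw [if_pos hc, hq]
            simp
          · have hq : pvQ i chunk[j₀] = false := by
              simp only [pvQ, Bool.and_eq_false_iff, beq_eq_false_iff_ne, ne_eq,
                List.getD_eq_getElem _ _ hrow]
              exact Or.inr hc
            rw [if_neg hc, hq]
            simp
    rw [hstep, show ((j₀:Int) + 1) = ((j₀+1 : Nat) : Int) from by push_cast; ring]
    exact ih (j₀+1) (by omega) (by omega)

theorem parse_lock_main : ∀ (chunk : List String), Pre_parse_lock chunk →
    parse_lock chunk = parse_lock_alt chunk := by
  rintro chunk ⟨hne, hlen⟩
  obtain ⟨s, rest, rfl⟩ : ∃ s rest, chunk = s :: rest := by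
    cases chunk with
    | nil => exact absurd rfl hne
    | cons s rest => exact ⟨s, rest, rfl⟩
  simp only [List.headI] at hlen
  have h0 : PySem.List.pyGet? (s :: rest) (0:Int) = some s := by
    rw [show (0:Int) = ((0:Nat):Int) from rfl, PySem.List.pyGet?_natCast]
    rfl
  -- A computes pvCol column by column
  have hA : parse_lock (s :: rest) = (List.range s.toList.length).filterMap (pvCol (s :: rest)) := by
    simp only [parse_lock, h0, PySem.Str.len_eq]
    rw [pvFoldlOpt, List.nil_append, PySem.List.pyRange_zero_nat s.toList.length,
      List.filterMap_map]
    simp only [Function.comp]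
    apply List.filterMap_congr
    intro i hi
    have hilt := List.mem_range.mp hi
    have hI := pvInnerA (s :: rest) i (fun j hj hp => hlen i hilt j hj hp) ((s :: rest).length) 0
      rfl (by omega) (fun j' h => absurd h (Nat.not_lt_zero j'))
    simp only [Nat.cast_zero, List.drop_zero] at hI
    rw [hI]
    simp [pvCol]
  -- B computes the same columns in its result slots
  have hB : parse_lock_alt (s :: rest)
      = (pvRes (s :: rest) s.toList.length (s :: rest).length).filterMap id := by
    simp only [parse_lock_alt, h0, PySem.Str.len_eq, Int.toNat_natCast]
    have hrep : List.replicate s.toList.length (none : Option Int)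
        = pvRes (s :: rest) s.toList.length 0 := by
      apply List.ext_getElem
      · simp [pvRes]
      · intro k h1 h2
        simp [pvRes]
    have hout := pvOuterFold (s :: rest) s.toList.length hlen ((s :: rest).length) 0 rfl
      (by omega)
    simp only [Nat.cast_zero] at hout
    rw [hrep, hout]
  rw [hA, hB]
  have htake : pvRes (s :: rest) s.toList.length (s :: rest).length
      = (List.range s.toList.length).map (pvCol (s :: rest)) := by
    simp [pvRes, pvCol]
  rw [htake, List.filterMap_map]
  rfl

-- ===== VERDICT (by name: the statement is the Claim_ definition above) =====
theorem parse_lock_spec : Claim_equal_parse_lock := by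
  intro chunk _ hpre
  exact parse_lock_main chunk hpre
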